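-- pv_equiv track=rewrite | github.com/MC-and-his-Agents/Syvert | .loom/bin/loom_flow.py | reconciliation_result
-- ===== SOURCE A (Python) =====
-- from typing import Any
--
-- def reconciliation_result(findings: list[dict[str, Any]]) -> str:
--     if not findings:
--         return "pass"
--     rank = {"warn": 1, "fix-needed": 2, "block": 3}
--     highest = max(rank.get(str(finding.get("severity")), 0) for finding in findings)
--     if highest == 3:
--         return "block"
--     if highest == 2:
--         return "fix-needed"
--     return "warn"
-- ===== SOURCE B (Python) =====
-- def reconciliation_result(findings: list) -> str:
--     if not findings:
--         return "pass"
--     severities = [str(f.get("severity")) for f in findings]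
--     for label in ("block", "fix-needed"):
--         if label in severities:
--             return label
--     return "warn"
-- ===== Notes on version B (the rewrite author's own statement) =====
-- stated objective: idiomatic
-- what changed: Replaces the numeric severity ranking and max-over-ranks pass with ordered membership tests on the severity strings in priority order (block, then fix-needed), defaulting to warn.
import Mathlib
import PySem

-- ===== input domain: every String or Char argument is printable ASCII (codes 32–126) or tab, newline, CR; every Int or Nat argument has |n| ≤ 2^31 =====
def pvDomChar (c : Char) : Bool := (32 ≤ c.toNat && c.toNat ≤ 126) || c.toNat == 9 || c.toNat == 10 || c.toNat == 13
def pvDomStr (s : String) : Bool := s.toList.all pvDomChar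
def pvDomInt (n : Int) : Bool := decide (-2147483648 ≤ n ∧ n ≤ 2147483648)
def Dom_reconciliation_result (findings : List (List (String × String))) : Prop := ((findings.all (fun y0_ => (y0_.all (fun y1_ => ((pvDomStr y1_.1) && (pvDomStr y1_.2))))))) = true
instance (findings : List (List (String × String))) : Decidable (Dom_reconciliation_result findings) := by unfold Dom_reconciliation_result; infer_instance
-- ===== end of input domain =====

-- B replaces A's numeric severity ranking + max pass with ordered membership tests
-- on the severity strings in priority order (idiomatic; same cost).


-- ===== PORT A =====
-- str(finding.get("severity")): first match in the association list; str(None) = "None"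
def pvSevA (f : List (String × String)) : String :=
  match (PySem.Dict.mk f).get? "severity" with
  | none => "None"
  | some s => s

-- rank.get(s, 0)
def pvRankA (s : String) : Int :=
  if s = "warn" then 1 else if s = "fix-needed" then 2 else if s = "block" then 3 else 0

def reconciliation_result (findings : List (List (String × String))) : String :=
  if findings = [] then "pass"
  else
    let highest := (findings.map (fun f => pvRankA (pvSevA f))).foldl max 0
    if highest = 3 then "block"
    else if highest = 2 then "fix-needed"
    else "warn"

-- ===== PORT B =====
-- str(f.get("severity")) is the same expression in Source B; pvSevA is shared
def reconciliation_result_alt (findings : List (List (String × String))) : String :=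
  if findings = [] then "pass"
  else
    let severities := findings.map pvSevA
    if severities.contains "block" then "block"
    else if severities.contains "fix-needed" then "fix-needed"
    else "warn"

-- ===== PRECONDITION & SPEC =====
def Spec_reconciliation_result (findings : List (List (String × String))) (out : String) : Prop := out = reconciliation_result_alt findings
instance (findings : List (List (String × String))) (out : String) : Decidable (Spec_reconciliation_result findings out) := by unfold Spec_reconciliation_result; infer_instance

-- ===== CLAIM (what is proved, stated in full; the proofs are below) =====
def Claim_equal_reconciliation_result : Prop := ∀ (findings : List (List (String × String))), Dom_reconciliation_result findings → Spec_reconciliation_result findings (reconciliation_result findings)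

-- ===== LEMMAS AND PROOFS =====

-- closed form of A's running max over the ranks of a severity list
def pvHi (sevs : List String) : Int :=
  if sevs.contains "block" then 3
  else if sevs.contains "fix-needed" then 2
  else if sevs.contains "warn" then 1
  else 0

lemma pvHi_nonneg (sevs : List String) : 0 ≤ pvHi sevs := by
  unfold pvHi; split_ifs <;> norm_num

lemma foldl_max_rank (sevs : List String) (a : Int) (ha : 0 ≤ a) :
    (sevs.map pvRankA).foldl max a = max a (pvHi sevs) := by
  induction sevs generalizing a with
  | nil => simp [pvHi, max_eq_left ha]
  | cons s t ih =>
    simp only [List.map_cons, List.foldl_cons]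
    rw [ih _ (le_trans ha (le_max_left _ _)), max_assoc]
    congr 1
    unfold pvHi pvRankA
    by_cases hb : s = "block" <;> by_cases hf : s = "fix-needed" <;>
      by_cases hw : s = "warn" <;>
      simp_all [eq_comm] <;> split_ifs <;> simp_all

theorem reconciliation_result_spec : Claim_equal_reconciliation_result := by
  unfold Claim_equal_reconciliation_result
  intro findings _
  unfold Spec_reconciliation_result reconciliation_result reconciliation_result_alt
  by_cases h : findings = []
  · simp [h]
  · simp only [h, if_false]
    rw [show findings.map (fun f => pvRankA (pvSevA f)) = (findings.map pvSevA).map pvRankA by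
          simp [List.map_map],
        foldl_max_rank _ 0 le_rfl]
    have := pvHi_nonneg (findings.map pvSevA)
    rw [max_eq_right this]
    unfold pvHi
    split_ifs <;> simp_all
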